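-- pv_equiv track=rewrite | github.com/Deepmind666/doubleLLM_logit_comflicts | patent_cn/scripts/claim_support_mapper.py | locate_terms_in_sections
-- ===== SOURCE A (Python) =====
-- def locate_terms_in_sections(terms, sections):
--     hits = []
--     for term in terms:
--         found_sections = []
--         for sec, line in sections:
--             if term in line:
--                 found_sections.append(sec)
--         found_sections = sorted(set(found_sections))
--         if found_sections:
--             hits.append((term, found_sections))
--     return hits
-- ===== SOURCE B (Python) =====
-- def locate_terms_in_sections(terms, sections):
--     # Rabin-Karp-style multi-pattern window matching: enumerate every window of each
--     # distinct term length per line and look it up in a hash set of terms, instead of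
--     # testing each term against each line with 'in'.
--     term_set = set(terms)
--     lengths = sorted(set(len(t) for t in terms))
--     hit_secs = {}
--     for sec, line in sections:
--         n = len(line)
--         for k in lengths:
--             for i in range(n - k + 1):
--                 w = line[i:i + k]
--                 if w in term_set:
--                     hit_secs.setdefault(w, set()).add(sec)
--     return [(t, sorted(hit_secs[t])) for t in terms if t in hit_secs]
-- ===== Notes on version B (the rewrite author's own statement) =====
-- stated objective: alternative
-- what changed: B replaces A's per-term 'term in line' scan of every section by window enumeration multi-pattern matching: per line it slides a window of each distinct term length and looks the window up in a hash set of the terms, collecting section ids per matched term in one pass, then reads the result off in terms order.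
import Mathlib
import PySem

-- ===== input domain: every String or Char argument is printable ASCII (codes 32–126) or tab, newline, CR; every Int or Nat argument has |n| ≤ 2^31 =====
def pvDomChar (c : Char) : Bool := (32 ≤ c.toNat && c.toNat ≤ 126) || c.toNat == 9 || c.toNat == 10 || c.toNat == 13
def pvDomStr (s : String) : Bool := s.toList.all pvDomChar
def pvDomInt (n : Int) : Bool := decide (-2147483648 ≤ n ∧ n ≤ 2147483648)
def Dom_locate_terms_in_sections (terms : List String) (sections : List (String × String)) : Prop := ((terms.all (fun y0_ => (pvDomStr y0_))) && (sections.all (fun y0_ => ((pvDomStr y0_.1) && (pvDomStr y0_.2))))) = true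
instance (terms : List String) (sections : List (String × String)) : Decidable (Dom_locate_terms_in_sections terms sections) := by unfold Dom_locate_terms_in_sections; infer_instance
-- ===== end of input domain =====

-- B replaces A's per-term substring scan of every line by window enumeration: for each line it slides a
-- window of each distinct term length and looks the window up in a hash set of terms (same cost class, a
-- genuinely different multi-pattern matching mechanism).

-- ===== PORT A =====
-- A: for each term, scan all sections, collect the ids of sections whose line contains the term, sorted(set(...)), keep if nonempty.
def locate_terms_in_sections (terms : List String) (sections : List (String × String)) : List (String × List String) :=
  terms.foldl (fun hits term =>
    let found_sections :=
      sections.foldl (fun acc p =>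
        if PySem.Str.isIn term p.2 then acc ++ [p.1] else acc) []
    let found_sections := PySem.List.sorted (PySem.Set.ofList found_sections) (fun x => x) false
    if found_sections ≠ [] then hits ++ [(term, found_sections)] else hits) []

-- ===== PORT B =====
-- B: one pass over the sections; per line, slide a window of each distinct term length over the line and
-- look the window up in term_set; matched windows collect their section id in hit_secs; read off in terms order.
def locate_terms_in_sections_alt (terms : List String) (sections : List (String × String)) : List (String × List String) :=
  let term_set : PySem.Set String := PySem.Set.ofList terms
  let lengths : List Int :=
    PySem.List.sorted (PySem.Set.ofList (terms.map (fun t => (PySem.Str.len t : Int)))) (fun x => x) false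
  let hit_secs : PySem.Dict String (PySem.Set String) :=
    sections.foldl (fun d p =>
      let n : Int := PySem.Str.len p.2
      lengths.foldl (fun d k =>
        (PySem.List.pyRange 0 (n - k + 1) 1).foldl (fun d i =>
          let w := PySem.Str.slice p.2 (some i) (some (i + k))
          if PySem.Set.contains term_set w then
            d.modify w PySem.Set.empty (fun s => PySem.Set.add s p.1)
          else d) d) d) PySem.Dict.empty
  (terms.filter (fun t => hit_secs.contains t)).map
    (fun t => (t, PySem.List.sorted (hit_secs.getD t PySem.Set.empty) (fun x => x) false))

-- ===== PRECONDITION & SPEC =====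
def Spec_locate_terms_in_sections (terms : List String) (sections : List (String × String)) (out : List (String × List String)) : Prop := out = locate_terms_in_sections_alt terms sections
instance (terms : List String) (sections : List (String × String)) (out : List (String × List String)) : Decidable (Spec_locate_terms_in_sections terms sections out) := by unfold Spec_locate_terms_in_sections; infer_instance

-- ===== CLAIM (what is proved, stated in full; the proofs are below) =====
def Claim_equal_locate_terms_in_sections : Prop := ∀ (terms : List String) (sections : List (String × String)), Dom_locate_terms_in_sections terms sections → Spec_locate_terms_in_sections terms sections (locate_terms_in_sections terms sections)

-- ===== LEMMAS AND PROOFS =====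

-- the ids of the sections whose line contains t, in section order (A's inner loop; also the add-history of B's key t)
def pvFound (sections : List (String × String)) (t : String) : List String :=
  (sections.filter (fun p => PySem.Str.isIn t p.2)).map Prod.fst

theorem pv_add_idem (s : PySem.Set String) (x : String) :
    PySem.Set.add (PySem.Set.add s x) x = PySem.Set.add s x := by
  have hx : x ∈ PySem.Set.add s x := (PySem.Set.mem_add s x x).2 (Or.inr rfl)
  exact PySem.Set.add_of_mem hx

theorem get?_modify' (d : PySem.Dict String (PySem.Set String)) (k k' : String) (f : PySem.Set String → PySem.Set String) :
    (d.modify k PySem.Set.empty f).get? k' = if k' = k then some (f (d.getD k PySem.Set.empty)) else d.get? k' := by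
  by_cases h : k' = k
  · subst h; simp [PySem.Dict.modify, PySem.Dict.get?_insert_self, PySem.Dict.getD_eq_get?_getD]
  · simp [PySem.Dict.modify, PySem.Dict.get?_insert_of_ne (hne := h), h]

-- the i-loop of B for one window length k over one line
theorem pv_i_fold_get? (term_set : PySem.Set String) (line sec : String) (k : Int)
    (is : List Int) (d : PySem.Dict String (PySem.Set String)) (t : String) :
    (is.foldl (fun d i =>
        let w := PySem.Str.slice line (some i) (some (i + k))
        if PySem.Set.contains term_set w then
          d.modify w PySem.Set.empty (fun s => PySem.Set.add s sec)
        else d) d).get? t =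
      if (PySem.Set.contains term_set t && is.any (fun i => PySem.Str.slice line (some i) (some (i + k)) == t)) = true then
        some (PySem.Set.add (d.getD t PySem.Set.empty) sec)
      else d.get? t := by
  induction is generalizing d with
  | nil => simp
  | cons i rest ih =>
    simp only [List.foldl_cons, List.any_cons]
    by_cases hct : PySem.Set.contains term_set t = true
    · by_cases hwt : PySem.Str.slice line (some i) (some (i + k)) = t
      · have hcw : PySem.Set.contains term_set (PySem.Str.slice line (some i) (some (i + k))) = true := by
          rw [hwt]; exact hct
        simp only [hcw, if_pos]
        rw [ih]
        have hgd : ((d.modify (PySem.Str.slice line (some i) (some (i + k))) PySem.Set.empty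
            (fun s => PySem.Set.add s sec)).getD t PySem.Set.empty) =
            PySem.Set.add (d.getD t PySem.Set.empty) sec := by
          rw [hwt, PySem.Dict.getD_eq_get?_getD, get?_modify']
          simp
        have hbeq : (PySem.Str.slice line (some i) (some (i + k)) == t) = true := by
          simp [hwt]
        by_cases hr : rest.any (fun i => PySem.Str.slice line (some i) (some (i + k)) == t) = true
        · simp only [hct, hr, Bool.and_self, if_pos, hgd, hbeq, Bool.true_or, Bool.and_true, true_and]
          rw [pv_add_idem]
        · simp only [Bool.not_eq_true] at hr
          simp only [hct, hr, Bool.and_false, Bool.false_eq_true, if_neg, hbeq, Bool.true_or,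
            Bool.and_true, true_and, not_false_eq_true]
          rw [hwt, get?_modify']
          simp
      · have hbeq : (PySem.Str.slice line (some i) (some (i + k)) == t) = false := by
          simp [hwt]
        have hpres : ∀ d' : PySem.Dict String (PySem.Set String),
            (if PySem.Set.contains term_set (PySem.Str.slice line (some i) (some (i + k))) = true then
              d'.modify (PySem.Str.slice line (some i) (some (i + k))) PySem.Set.empty
                (fun s => PySem.Set.add s sec) else d').get? t = d'.get? t := by
          intro d'
          split
          · rw [get?_modify']
            split
            · rename_i het; exact absurd het.symm hwt
            · rfl
          · rfl
        have hpresD : ∀ d' : PySem.Dict String (PySem.Set String),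
            (if PySem.Set.contains term_set (PySem.Str.slice line (some i) (some (i + k))) = true then
              d'.modify (PySem.Str.slice line (some i) (some (i + k))) PySem.Set.empty
                (fun s => PySem.Set.add s sec) else d').getD t PySem.Set.empty = d'.getD t PySem.Set.empty := by
          intro d'
          rw [PySem.Dict.getD_eq_get?_getD, hpres, PySem.Dict.getD_eq_get?_getD]
        by_cases hcw : PySem.Set.contains term_set (PySem.Str.slice line (some i) (some (i + k))) = true
        · simp only [hcw, if_pos]
          rw [ih]
          have h1 := hpres d
          have h2 := hpresD d
          simp only [hcw, if_pos] at h1 h2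
          rw [h1, h2]
          simp only [hbeq, Bool.false_or]
        · simp only [Bool.not_eq_true] at hcw
          simp only [hcw, Bool.false_eq_true, if_neg, not_false_eq_true]
          rw [ih]
          simp only [hbeq, Bool.false_or]
    · simp only [Bool.not_eq_true] at hct
      have hpres : ∀ d' : PySem.Dict String (PySem.Set String), _ := fun d' =>
        (show (if PySem.Set.contains term_set (PySem.Str.slice line (some i) (some (i + k))) = true then
            d'.modify (PySem.Str.slice line (some i) (some (i + k))) PySem.Set.empty
              (fun s => PySem.Set.add s sec) else d').get? t = d'.get? t from by
          split
          · rename_i hcw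
            rw [get?_modify']
            split
            · rename_i het; rw [← het, hct] at hcw; exact absurd hcw (by simp)
            · rfl
          · rfl)
      rw [ih]
      simp only [hct, Bool.false_and, Bool.false_eq_true, if_neg, not_false_eq_true]
      exact hpres d

-- the k-loop of B over one line
theorem pv_k_fold_get? (term_set : PySem.Set String) (line sec : String) (n : Int)
    (ks : List Int) (d : PySem.Dict String (PySem.Set String)) (t : String) :
    (ks.foldl (fun d k =>
        (PySem.List.pyRange 0 (n - k + 1) 1).foldl (fun d i =>
          let w := PySem.Str.slice line (some i) (some (i + k))
          if PySem.Set.contains term_set w then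
            d.modify w PySem.Set.empty (fun s => PySem.Set.add s sec)
          else d) d) d).get? t =
      if (PySem.Set.contains term_set t &&
          ks.any (fun k => (PySem.List.pyRange 0 (n - k + 1) 1).any
            (fun i => PySem.Str.slice line (some i) (some (i + k)) == t))) = true then
        some (PySem.Set.add (d.getD t PySem.Set.empty) sec)
      else d.get? t := by
  induction ks generalizing d with
  | nil => simp
  | cons k rest ih =>
    simp only [List.foldl_cons, List.any_cons]
    have hhead := pv_i_fold_get? term_set line sec k (PySem.List.pyRange 0 (n - k + 1) 1) d t
    by_cases hct : PySem.Set.contains term_set t = true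
    · by_cases hk : (PySem.List.pyRange 0 (n - k + 1) 1).any
          (fun i => PySem.Str.slice line (some i) (some (i + k)) == t) = true
      · simp only [hct, hk, Bool.and_self, if_pos] at hhead
        have hgd : ((PySem.List.pyRange 0 (n - k + 1) 1).foldl (fun d i =>
            let w := PySem.Str.slice line (some i) (some (i + k))
            if PySem.Set.contains term_set w then
              d.modify w PySem.Set.empty (fun s => PySem.Set.add s sec)
            else d) d).getD t PySem.Set.empty = PySem.Set.add (d.getD t PySem.Set.empty) sec := by
          rw [PySem.Dict.getD_eq_get?_getD, hhead]
          rfl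
        rw [ih, hgd, hhead]
        by_cases hr : rest.any (fun k => (PySem.List.pyRange 0 (n - k + 1) 1).any
            (fun i => PySem.Str.slice line (some i) (some (i + k)) == t)) = true
        · simp only [hct, hr, hk, Bool.and_self, if_pos, Bool.true_or, Bool.true_and]
          rw [pv_add_idem]
        · simp only [Bool.not_eq_true] at hr
          simp only [hct, hr, hk, Bool.and_false, Bool.false_eq_true, if_neg, not_false_eq_true,
            Bool.true_or, Bool.true_and]
          simp
      · simp only [Bool.not_eq_true] at hk
        simp only [hct, hk, Bool.and_false, Bool.false_eq_true, if_neg, not_false_eq_true] at hhead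
        have hgd : ((PySem.List.pyRange 0 (n - k + 1) 1).foldl (fun d i =>
            let w := PySem.Str.slice line (some i) (some (i + k))
            if PySem.Set.contains term_set w then
              d.modify w PySem.Set.empty (fun s => PySem.Set.add s sec)
            else d) d).getD t PySem.Set.empty = d.getD t PySem.Set.empty := by
          rw [PySem.Dict.getD_eq_get?_getD, hhead, PySem.Dict.getD_eq_get?_getD]
        rw [ih, hgd, hhead]
        simp only [hk, Bool.false_or]
    · simp only [Bool.not_eq_true] at hct
      simp only [hct, Bool.false_and, Bool.false_eq_true, if_neg, not_false_eq_true] at hhead ⊢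
      rw [ih, hhead]
      simp only [hct, Bool.false_and, Bool.false_eq_true, if_neg, not_false_eq_true]

-- window characterization: some full window of some term length equals t, iff t ∈ terms and t occurs in line
theorem pv_match_iff (terms : List String) (line t : String) :
    (PySem.Set.contains (PySem.Set.ofList terms) t &&
      (PySem.List.sorted (PySem.Set.ofList (terms.map (fun s => (PySem.Str.len s : Int)))) (fun x => x) false).any
        (fun k => (PySem.List.pyRange 0 ((PySem.Str.len line : Int) - k + 1) 1).any
          (fun i => PySem.Str.slice line (some i) (some (i + k)) == t))) = true
    ↔ (t ∈ terms ∧ PySem.Str.isIn t line = true) := by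
  constructor
  · intro hb
    rw [Bool.and_eq_true] at hb
    obtain ⟨hcontains, hany⟩ := hb
    have ht : t ∈ terms := (PySem.Set.mem_ofList terms t).1 ((PySem.Set.contains_iff _ t).1 hcontains)
    refine ⟨ht, ?_⟩
    rw [List.any_eq_true] at hany
    obtain ⟨k, hk, hany2⟩ := hany
    rw [List.any_eq_true] at hany2
    obtain ⟨i, hi, heq⟩ := hany2
    rw [beq_iff_eq] at heq
    rw [PySem.List.mem_pyRange_one] at hi
    rw [PySem.List.mem_sorted] at hk
    have hk0 : 0 ≤ k := by
      obtain ⟨s, _, rfl⟩ := List.mem_map.1 ((PySem.Set.mem_ofList _ k).1 hk)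
      rw [PySem.Str.len_eq]
      omega
    have hi' : (some i) = some ((i.toNat : Int)) := by congr 1; omega
    have hik : (some (i + k)) = some ((i.toNat : Int) + (k.toNat : Int)) := by congr 1; omega
    rw [hi', hik] at heq
    have htl : t.toList = List.take k.toNat (List.drop i.toNat line.toList) := by
      rw [← heq, PySem.Str.toList_slice, PySem.Chars.slice_eq_listSlice,
        PySem.List.slice_natCast_add]
    rw [PySem.Str.isIn_eq, ← PySem.Chars.exists_prefix_drop_iff_isIn]
    exact ⟨i.toNat, htl ▸ List.take_prefix _ _⟩
  · rintro ⟨ht, hin⟩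
    rw [Bool.and_eq_true]
    refine ⟨(PySem.Set.contains_iff _ t).2 ((PySem.Set.mem_ofList terms t).2 ht), ?_⟩
    rw [PySem.Str.isIn_eq, ← PySem.Chars.exists_prefix_drop_iff_isIn] at hin
    obtain ⟨j, hpre⟩ := hin
    have hpre' : t.toList <+: List.drop (min j line.toList.length) line.toList := by
      rcases le_total j line.toList.length with hj | hj
      · rwa [min_eq_left hj]
      · have hnil : List.drop j line.toList = [] := by
          rw [List.drop_eq_nil_iff]
          omega
        rw [hnil] at hpre
        have : t.toList = [] := List.prefix_nil.mp hpre
        simp [this]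
    have hlen : t.toList.length ≤ line.toList.length - min j line.toList.length := by
      have := hpre'.length_le
      simpa using this
    have hjle : min j line.toList.length ≤ line.toList.length := min_le_right _ _
    rw [List.any_eq_true]
    refine ⟨(t.toList.length : Int), ?_, ?_⟩
    · rw [PySem.List.mem_sorted]
      exact (PySem.Set.mem_ofList _ _).2 (List.mem_map.2 ⟨t, ht, by rw [PySem.Str.len_eq]⟩)
    · rw [List.any_eq_true]
      refine ⟨((min j line.toList.length : Nat) : Int), ?_, ?_⟩
      · rw [PySem.List.mem_pyRange_one, PySem.Str.len_eq]
        constructor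
        · omega
        · push_cast
          omega
      · rw [beq_iff_eq]
        apply String.toList_inj.mp
        rw [PySem.Str.toList_slice, PySem.Chars.slice_eq_listSlice,
          PySem.List.slice_natCast_add]
        obtain ⟨r, hr⟩ := hpre'
        rw [← hr]
        exact List.take_left' rfl

-- effect of one section on key t
theorem pv_sec_get? (terms : List String) (p : String × String)
    (d : PySem.Dict String (PySem.Set String)) (t : String) :
    ((PySem.List.sorted (PySem.Set.ofList (terms.map (fun t => (PySem.Str.len t : Int)))) (fun x => x) false).foldl
        (fun d k =>
          (PySem.List.pyRange 0 ((PySem.Str.len p.2 : Int) - k + 1) 1).foldl (fun d i =>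
            let w := PySem.Str.slice p.2 (some i) (some (i + k))
            if PySem.Set.contains (PySem.Set.ofList terms) w then
              d.modify w PySem.Set.empty (fun s => PySem.Set.add s p.1)
            else d) d) d).get? t =
      if t ∈ terms ∧ PySem.Str.isIn t p.2 = true then
        some (PySem.Set.add (d.getD t PySem.Set.empty) p.1)
      else d.get? t := by
  rw [pv_k_fold_get?]
  by_cases h : t ∈ terms ∧ PySem.Str.isIn t p.2 = true
  · rw [if_pos ((pv_match_iff terms p.2 t).2 h), if_pos h]
  · rw [if_neg (fun hb => h ((pv_match_iff terms p.2 t).1 hb)), if_neg h]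

-- effect of the whole section loop on key t
theorem pv_outer_get? (terms : List String) (sections : List (String × String))
    (d : PySem.Dict String (PySem.Set String)) (t : String) :
    (sections.foldl (fun d p =>
        (PySem.List.sorted (PySem.Set.ofList (terms.map (fun t => (PySem.Str.len t : Int)))) (fun x => x) false).foldl
          (fun d k =>
            (PySem.List.pyRange 0 ((PySem.Str.len p.2 : Int) - k + 1) 1).foldl (fun d i =>
              let w := PySem.Str.slice p.2 (some i) (some (i + k))
              if PySem.Set.contains (PySem.Set.ofList terms) w then
                d.modify w PySem.Set.empty (fun s => PySem.Set.add s p.1)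
              else d) d) d) d).get? t =
      if t ∈ terms ∧ pvFound sections t ≠ [] then
        some ((pvFound sections t).foldl PySem.Set.add (d.getD t PySem.Set.empty))
      else d.get? t := by
  induction sections generalizing d with
  | nil => simp [pvFound]
  | cons p rest ih =>
    simp only [List.foldl_cons, ih]
    have hsec := pv_sec_get? terms p d t
    have hsecD : ∀ h : t ∈ terms ∧ PySem.Str.isIn t p.2 = true,
        ((PySem.List.sorted (PySem.Set.ofList (terms.map (fun t => (PySem.Str.len t : Int)))) (fun x => x) false).foldl
          (fun d k =>
            (PySem.List.pyRange 0 ((PySem.Str.len p.2 : Int) - k + 1) 1).foldl (fun d i =>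
              let w := PySem.Str.slice p.2 (some i) (some (i + k))
              if PySem.Set.contains (PySem.Set.ofList terms) w then
                d.modify w PySem.Set.empty (fun s => PySem.Set.add s p.1)
              else d) d) d).getD t PySem.Set.empty =
          PySem.Set.add (d.getD t PySem.Set.empty) p.1 := by
      intro h
      rw [PySem.Dict.getD_eq_get?_getD, hsec, if_pos h]
      rfl
    have hsecD' : ¬ (t ∈ terms ∧ PySem.Str.isIn t p.2 = true) →
        ((PySem.List.sorted (PySem.Set.ofList (terms.map (fun t => (PySem.Str.len t : Int)))) (fun x => x) false).foldl
          (fun d k =>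
            (PySem.List.pyRange 0 ((PySem.Str.len p.2 : Int) - k + 1) 1).foldl (fun d i =>
              let w := PySem.Str.slice p.2 (some i) (some (i + k))
              if PySem.Set.contains (PySem.Set.ofList terms) w then
                d.modify w PySem.Set.empty (fun s => PySem.Set.add s p.1)
              else d) d) d).getD t PySem.Set.empty = d.getD t PySem.Set.empty := by
      intro h
      rw [PySem.Dict.getD_eq_get?_getD, hsec, if_neg h, PySem.Dict.getD_eq_get?_getD]
    by_cases hT : t ∈ terms
    · by_cases hin : PySem.Str.isIn t p.2 = true
      · have hin' : PySem.Chars.isIn t.toList p.2.toList = true := by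
          rw [← PySem.Str.isIn_eq]; exact hin
        have hf : pvFound (p :: rest) t = p.1 :: pvFound rest t := by
          simp [pvFound, hin']
        rw [hf]
        by_cases hr : pvFound rest t = []
        · simp only [hr, hT, true_and, ne_eq, not_true_eq_false, if_false, reduceCtorEq,
            not_false_eq_true, if_true, List.foldl_cons, List.foldl_nil]
          rw [hsec, if_pos ⟨hT, hin⟩]
        · simp only [hr, hT, true_and, ne_eq, not_false_eq_true, if_true, reduceCtorEq, List.foldl_cons]
          rw [hsecD ⟨hT, hin⟩]
      · have hin' : ¬ PySem.Chars.isIn t.toList p.2.toList = true := by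
          rw [← PySem.Str.isIn_eq]; exact hin
        have hf : pvFound (p :: rest) t = pvFound rest t := by
          simp [pvFound, hin']
        rw [hf, hsecD' (fun h => hin h.2)]
        by_cases hr : pvFound rest t = []
        · simp only [hr, ne_eq, not_true_eq_false, and_false, if_false]
          rw [hsec, if_neg (fun h => hin h.2)]
        · simp only [hr, hT, true_and, ne_eq, not_false_eq_true, if_true]
    · simp only [hT, false_and, if_false]
      rw [hsec, if_neg (fun h => hT h.1)]

theorem ofListNil (xs : List String) : PySem.Set.ofList xs = [] ↔ xs = [] := by
  cases xs with
  | nil => simp [PySem.Set.ofList]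
  | cons a l =>
    constructor
    · intro h
      have ha : a ∈ PySem.Set.ofList (a :: l) := (PySem.Set.mem_ofList (a :: l) a).2 (by simp)
      rw [h] at ha
      simp at ha
    · intro h; simp at h

-- ===== VERDICT (by name: the statement is the Claim_ definition above) =====
theorem locate_terms_in_sections_spec : Claim_equal_locate_terms_in_sections := by
  intro terms sections _
  unfold Spec_locate_terms_in_sections
  unfold locate_terms_in_sections locate_terms_in_sections_alt
  have hget : ∀ t, (sections.foldl (fun d p =>
      (PySem.List.sorted (PySem.Set.ofList (terms.map (fun t => (PySem.Str.len t : Int)))) (fun x => x) false).foldl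
        (fun d k =>
          (PySem.List.pyRange 0 ((PySem.Str.len p.2 : Int) - k + 1) 1).foldl (fun d i =>
            let w := PySem.Str.slice p.2 (some i) (some (i + k))
            if PySem.Set.contains (PySem.Set.ofList terms) w then
              d.modify w PySem.Set.empty (fun s => PySem.Set.add s p.1)
            else d) d) d) PySem.Dict.empty).get? t =
      if t ∈ terms ∧ pvFound sections t ≠ [] then some (PySem.Set.ofList (pvFound sections t)) else none := by
    intro t
    rw [pv_outer_get?]
    simp [PySem.Set.ofList_eq_foldl, PySem.Dict.getD_empty, PySem.Dict.get?_empty, PySem.Set.empty]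
  have hA : terms.foldl (fun hits term =>
      let found_sections :=
        sections.foldl (fun acc p =>
          if PySem.Str.isIn term p.2 then acc ++ [p.1] else acc) []
      let found_sections := PySem.List.sorted (PySem.Set.ofList found_sections) (fun x => x) false
      if found_sections ≠ [] then hits ++ [(term, found_sections)] else hits) [] =
    (terms.filter (fun t => decide (pvFound sections t ≠ []))).map
      (fun t => (t, PySem.List.sorted (PySem.Set.ofList (pvFound sections t)) (fun x => x) false)) := by
    have hstep : ∀ (hits : List (String × List String)) (term : String),
        (let found_sections :=
          sections.foldl (fun acc p =>
            if PySem.Str.isIn term p.2 then acc ++ [p.1] else acc) []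
         let found_sections := PySem.List.sorted (PySem.Set.ofList found_sections) (fun x => x) false
         if found_sections ≠ [] then hits ++ [(term, found_sections)] else hits) =
        (if pvFound sections term ≠ [] then hits ++ [(term, PySem.List.sorted (PySem.Set.ofList (pvFound sections term)) (fun x => x) false)] else hits) := by
      intro hits term
      have hfl : sections.foldl (fun acc p =>
          if PySem.Str.isIn term p.2 then acc ++ [p.1] else acc) [] = pvFound sections term := by
        rw [PySem.List.foldl_append_if]
        simp [pvFound]
      simp only [hfl, ne_eq, PySem.List.sorted_eq_nil_iff, ofListNil]
    simp only [hstep]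
    rw [PySem.List.foldl_append_ite (p := fun t => pvFound sections t ≠ [])
        (f := fun t => (t, PySem.List.sorted (PySem.Set.ofList (pvFound sections t)) (fun x => x) false))]
    simp
  rw [hA]
  have hfilter : terms.filter (fun t => decide (pvFound sections t ≠ [])) =
      terms.filter (fun t => (sections.foldl (fun d p =>
        (PySem.List.sorted (PySem.Set.ofList (terms.map (fun t => (PySem.Str.len t : Int)))) (fun x => x) false).foldl
          (fun d k =>
            (PySem.List.pyRange 0 ((PySem.Str.len p.2 : Int) - k + 1) 1).foldl (fun d i =>
              let w := PySem.Str.slice p.2 (some i) (some (i + k))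
              if PySem.Set.contains (PySem.Set.ofList terms) w then
                d.modify w PySem.Set.empty (fun s => PySem.Set.add s p.1)
              else d) d) d) PySem.Dict.empty).contains t) := by
    apply List.filter_congr
    intro t ht
    rw [PySem.Dict.contains_eq_isSome_get?, hget t]
    by_cases h : pvFound sections t = [] <;> simp [h, ht]
  rw [hfilter]
  apply List.map_congr_left
  intro t ht
  rw [List.mem_filter] at ht
  obtain ⟨htm, hc⟩ := ht
  rw [PySem.Dict.contains_eq_isSome_get?, hget t] at hc
  by_cases h : pvFound sections t = []
  · simp [h, htm] at hc
  · have : (sections.foldl (fun d p =>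
        (PySem.List.sorted (PySem.Set.ofList (terms.map (fun t => (PySem.Str.len t : Int)))) (fun x => x) false).foldl
          (fun d k =>
            (PySem.List.pyRange 0 ((PySem.Str.len p.2 : Int) - k + 1) 1).foldl (fun d i =>
              let w := PySem.Str.slice p.2 (some i) (some (i + k))
              if PySem.Set.contains (PySem.Set.ofList terms) w then
                d.modify w PySem.Set.empty (fun s => PySem.Set.add s p.1)
              else d) d) d) PySem.Dict.empty).getD t PySem.Set.empty = PySem.Set.ofList (pvFound sections t) := by
      rw [PySem.Dict.getD_eq_get?_getD, hget t]
      simp [htm, h]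
    rw [this]
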